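-- pv_equiv track=rewrite | github.com/hampen2929/zloth | apps/api/src/tazuna_api/services/ci_check_service.py | _derive_status_from_jobs
-- ===== SOURCE A (Python) =====
-- def _derive_status_from_jobs(jobs: dict[str, str]) -> str:
--     """Derive overall CI status from individual job results.
--
--     Args:
--         jobs: Dict mapping job name to result/status.
--
--     Returns:
--         Overall status: "success", "pending", "failure", or "error".
--     """
--     if not jobs:
--         # No jobs found - could be CI hasn't started yet
--         return "pending"
--
--     pending_states = {"in_progress", "queued", "pending"}
--     failure_states = {"failure", "cancelled", "timed_out"}
--     success_states = {"success", "skipped", "neutral"}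
--
--     has_pending = False
--     has_failure = False
--     has_success = False
--
--     for result in jobs.values():
--         if result in pending_states:
--             has_pending = True
--         elif result in failure_states:
--             has_failure = True
--         elif result in success_states:
--             has_success = True
--         else:
--             # Unknown state, treat as pending
--             has_pending = True
--
--     # Priority: failure > pending > success
--     if has_failure:
--         return "failure"
--     if has_pending:
--         return "pending"
--     if has_success:
--         return "success"
--
--     # Fallback
--     return "pending"
-- ===== SOURCE B (Python) =====
-- def _derive_status_from_jobs(jobs: dict[str, str]) -> str:
--     """Derive overall CI status as the worst severity among job results."""
--     severity = {
--         "success": 0, "skipped": 0, "neutral": 0,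
--         "failure": 2, "cancelled": 2, "timed_out": 2,
--     }
--     # pending states and unknown states both default to severity 1
--     worst = max((severity.get(result, 1) for result in jobs.values()), default=1)
--     return ("success", "pending", "failure")[worst]
-- ===== Notes on version B (the rewrite author's own statement) =====
-- stated objective: simpler
-- what changed: Replaced A's three-boolean classification loop followed by a priority if-chain with a worst-severity reduction: each job result is mapped to a numeric rank (success 0, pending/unknown 1, failure 2), the ranks are reduced with max (default 1 covers the empty dict), and the answer is read from a result table indexed by the worst rank.
import Mathlib
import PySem

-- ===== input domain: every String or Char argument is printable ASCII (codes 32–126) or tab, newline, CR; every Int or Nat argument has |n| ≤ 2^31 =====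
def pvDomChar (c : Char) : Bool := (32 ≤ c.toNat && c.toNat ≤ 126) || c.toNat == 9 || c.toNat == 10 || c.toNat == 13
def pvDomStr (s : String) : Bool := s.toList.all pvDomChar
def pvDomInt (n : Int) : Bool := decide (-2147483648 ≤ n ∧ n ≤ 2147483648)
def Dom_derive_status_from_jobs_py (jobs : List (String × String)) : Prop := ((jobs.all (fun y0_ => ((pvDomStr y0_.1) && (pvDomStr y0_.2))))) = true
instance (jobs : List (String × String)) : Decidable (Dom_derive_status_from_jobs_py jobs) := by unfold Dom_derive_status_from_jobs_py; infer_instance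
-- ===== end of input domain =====

-- B replaces A's three-flag classification loop and priority if-chain by a worst-severity
-- reduction: each result is ranked 0/1/2 and the answer is a table lookup at the max rank;
-- objective: simpler.

-- ===== PORT A =====
def pvPendingStates : PySem.Set String := PySem.Set.ofList ["in_progress", "queued", "pending"]
def pvFailureStates : PySem.Set String := PySem.Set.ofList ["failure", "cancelled", "timed_out"]
def pvSuccessStates : PySem.Set String := PySem.Set.ofList ["success", "skipped", "neutral"]

def derive_status_from_jobs_py (jobs : List (String × String)) : String :=
  let d := PySem.Dict.ofList jobs
  if d.items.isEmpty then "pending"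
  else
    -- (has_pending, has_failure, has_success)
    let flags := d.values.foldl (fun (f : Bool × Bool × Bool) result =>
      if pvPendingStates.contains result then (true, f.2.1, f.2.2)
      else if pvFailureStates.contains result then (f.1, true, f.2.2)
      else if pvSuccessStates.contains result then (f.1, f.2.1, true)
      else (true, f.2.1, f.2.2)) (false, false, false)
    if flags.2.1 then "failure"
    else if flags.1 then "pending"
    else if flags.2.2 then "success"
    else "pending"

-- ===== PORT B =====
def pvSeverity : PySem.Dict String Nat :=
  PySem.Dict.ofList [("success", 0), ("skipped", 0), ("neutral", 0),
                     ("failure", 2), ("cancelled", 2), ("timed_out", 2)]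

def derive_status_from_jobs_py_alt (jobs : List (String × String)) : String :=
  let d := PySem.Dict.ofList jobs
  -- max(…, default=1): Python's max with a default ignores the default on a nonempty iterable
  let worst : Nat :=
    match d.values.map (fun result => pvSeverity.getD result 1) with
    | [] => 1
    | x :: xs => xs.foldl max x
  -- tuple index ("success","pending","failure")[worst]; worst ∈ {0,1,2} always, so the
  -- default of getD is never used (Python would raise IndexError only outside that range)
  ["success", "pending", "failure"].getD worst "pending"

-- ===== PRECONDITION & SPEC =====
def Spec_derive_status_from_jobs_py (jobs : List (String × String)) (out : String) : Prop := out = derive_status_from_jobs_py_alt jobs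
instance (jobs : List (String × String)) (out : String) : Decidable (Spec_derive_status_from_jobs_py jobs out) := by unfold Spec_derive_status_from_jobs_py; infer_instance

-- ===== CLAIM =====
def Claim_equal_derive_status_from_jobs_py : Prop := ∀ (jobs : List (String × String)), Dom_derive_status_from_jobs_py jobs → Spec_derive_status_from_jobs_py jobs (derive_status_from_jobs_py jobs)

-- ===== LEMMAS AND PROOFS =====

-- branch conditions under which A's loop sets each flag on one value
def pvIsPend (r : String) : Bool :=
  pvPendingStates.contains r
    || (!pvPendingStates.contains r && !pvFailureStates.contains r && !pvSuccessStates.contains r)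
def pvIsFail (r : String) : Bool := !pvPendingStates.contains r && pvFailureStates.contains r
def pvIsSucc (r : String) : Bool :=
  !pvPendingStates.contains r && !pvFailureStates.contains r && pvSuccessStates.contains r

-- the ideal rank of a single result
def pvRank3 (r : String) : Nat := if pvIsFail r then 2 else if pvIsPend r then 1 else 0

theorem foldl_flags (vals : List String) (a b c : Bool) :
    vals.foldl (fun (f : Bool × Bool × Bool) result =>
      if pvPendingStates.contains result then (true, f.2.1, f.2.2)
      else if pvFailureStates.contains result then (f.1, true, f.2.2)
      else if pvSuccessStates.contains result then (f.1, f.2.1, true)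
      else (true, f.2.1, f.2.2)) (a, b, c)
    = (a || vals.any pvIsPend, b || vals.any pvIsFail, c || vals.any pvIsSucc) := by
  induction vals generalizing a b c with
  | nil => simp
  | cons r vs ih =>
    simp only [List.foldl_cons, List.any_cons]
    by_cases h1 : r ∈ pvPendingStates
    · rw [if_pos (by simp [h1]), ih]
      simp [pvIsPend, pvIsFail, pvIsSucc, h1, Bool.or_assoc]
    · rw [if_neg (by simp [h1])]
      by_cases h2 : r ∈ pvFailureStates
      · rw [if_pos (by simp [h2]), ih]
        simp [pvIsPend, pvIsFail, pvIsSucc, h1, h2, Bool.or_assoc]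
      · rw [if_neg (by simp [h2])]
        by_cases h3 : r ∈ pvSuccessStates
        · rw [if_pos (by simp [h3]), ih]
          simp [pvIsPend, pvIsFail, pvIsSucc, h1, h2, h3, Bool.or_assoc]
        · rw [if_neg (by simp [h3]), ih]
          simp [pvIsPend, pvIsFail, pvIsSucc, h1, h2, h3, Bool.or_assoc]

theorem fail_cases {r : String} (h : r ∈ pvFailureStates) :
    r = "failure" ∨ r = "cancelled" ∨ r = "timed_out" := by
  rw [show pvFailureStates = ["failure", "cancelled", "timed_out"] from by decide] at h
  simpa using h

theorem succ_cases {r : String} (h : r ∈ pvSuccessStates) :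
    r = "success" ∨ r = "skipped" ∨ r = "neutral" := by
  rw [show pvSuccessStates = ["success", "skipped", "neutral"] from by decide] at h
  simpa using h

-- the severity dict realises pvRank3
theorem severity_eq_rank (r : String) : pvSeverity.getD r 1 = pvRank3 r := by
  by_cases h2 : r ∈ pvFailureStates
  · rcases fail_cases h2 with rfl | rfl | rfl <;> decide
  · by_cases h3 : r ∈ pvSuccessStates
    · rcases succ_cases h3 with rfl | rfl | rfl <;> decide
    · -- r is not a key of pvSeverity, so getD returns the default 1
      have hget : pvSeverity.getD r 1 = 1 := by
        have hk : r ∉ pvSeverity.keys := by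
          intro hr
          rw [show pvSeverity.keys = ["success", "skipped", "neutral",
              "failure", "cancelled", "timed_out"] from by decide] at hr
          simp only [List.mem_cons, List.not_mem_nil, or_false] at hr
          rcases hr with rfl | rfl | rfl | rfl | rfl | rfl
          · exact h3 (by decide)
          · exact h3 (by decide)
          · exact h3 (by decide)
          · exact h2 (by decide)
          · exact h2 (by decide)
          · exact h2 (by decide)
        simp [PySem.Dict.getD, (PySem.Dict.get?_eq_none_iff_not_mem_keys pvSeverity r).mpr hk]
      rw [hget]
      by_cases h1 : r ∈ pvPendingStates
      · simp [pvRank3, pvIsFail, pvIsPend, h1, h2]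
      · simp [pvRank3, pvIsFail, pvIsPend, h1, h2, h3]

theorem rank_le_two (r : String) : pvRank3 r ≤ 2 := by
  unfold pvRank3; split_ifs <;> omega

theorem foldl_max_rank (xs : List String) (n : Nat) (hn : n ≤ 2) :
    (xs.map pvRank3).foldl max n
      = if xs.any pvIsFail then 2 else if xs.any pvIsPend then max n 1 else n := by
  induction xs generalizing n with
  | nil => simp
  | cons r rs ih =>
    simp only [List.map_cons, List.foldl_cons, List.any_cons]
    rw [ih (max n (pvRank3 r)) (by have := rank_le_two r; omega)]
    by_cases hf : pvIsFail r = true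
    · have : pvRank3 r = 2 := by simp [pvRank3, hf]
      simp only [hf, Bool.true_or, if_pos rfl, this]
      split_ifs <;> omega
    · by_cases hp : pvIsPend r = true
      · have : pvRank3 r = 1 := by simp [pvRank3, hf, hp]
        simp only [hf, hp, Bool.false_or, Bool.true_or, this]
        split_ifs <;> omega
      · have : pvRank3 r = 0 := by simp [pvRank3, hf, hp]
        simp only [hf, hp, Bool.false_or, this]
        split_ifs <;> omega

-- every result falls into one of the three categories
theorem succ_of_not_fail_pend {r : String} (hf : ¬ pvIsFail r = true)
    (hp : ¬ pvIsPend r = true) : pvIsSucc r = true := by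
  unfold pvIsFail at hf
  unfold pvIsPend at hp
  unfold pvIsSucc
  by_cases h1 : pvPendingStates.contains r = true <;>
    by_cases h2 : pvFailureStates.contains r = true <;>
      by_cases h3 : pvSuccessStates.contains r = true <;>
        simp_all

-- ===== VERDICT =====
theorem derive_status_from_jobs_py_spec : Claim_equal_derive_status_from_jobs_py := by
  intro jobs _
  unfold Spec_derive_status_from_jobs_py derive_status_from_jobs_py derive_status_from_jobs_py_alt
  simp only []
  cases hI : (PySem.Dict.ofList jobs).items with
  | nil => simp [PySem.Dict.values, hI]
  | cons p rest =>
    have hvals : (PySem.Dict.ofList jobs).values = p.2 :: rest.map (·.2) := by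
      simp [PySem.Dict.values, hI]
    rw [hvals]
    simp only [hI, List.isEmpty_cons, if_neg (by decide : ¬ false = true)]
    simp only [foldl_flags, Bool.false_or, List.map_cons]
    rw [show (fun result => pvSeverity.getD result 1) = pvRank3 from funext severity_eq_rank]
    rw [severity_eq_rank]
    rw [foldl_max_rank _ _ (rank_le_two _)]
    by_cases hfp : pvIsFail p.2 = true <;>
      by_cases hfr : (rest.map (·.2)).any pvIsFail = true <;>
        by_cases hpp : pvIsPend p.2 = true <;>
          by_cases hpr : (rest.map (·.2)).any pvIsPend = true
    all_goals
      first
        | simp [pvRank3, hfp, hfr, hpp, hpr, List.getD, succ_of_not_fail_pend hfp hpp]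
        | simp [pvRank3, hfp, hfr, hpp, hpr, List.getD]
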